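-- pv_equiv track=rewrite | github.com/Yuanlong-Tony-Cui/Authoritative-DNS-Server | client.py | format_hex_str
-- ===== SOURCE A (Python) =====
-- def format_hex_str(arg_hex_str):
--     formatted_str = ""
--     i = 0
--     for hex_char in arg_hex_str:
--         formatted_str += hex_char
--         if i % 2 == 1 and i != len(arg_hex_str) - 1:
--             formatted_str += " "
--             if (i + 1) % (16 * 2) == 0:
--                 formatted_str += "\n"
--         i += 1
--     return formatted_str
-- ===== SOURCE B (Python) =====
-- def format_hex_str(arg_hex_str):
--     pairs = [arg_hex_str[i:i + 2] for i in range(0, len(arg_hex_str), 2)]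
--     parts = []
--     for j, p in enumerate(pairs):
--         if j > 0:
--             parts.append(" \n" if j % 16 == 0 else " ")
--         parts.append(p)
--     return "".join(parts)
-- ===== Notes on version B (the rewrite author's own statement) =====
-- stated objective: simpler
-- what changed: B first chunks the string into 2-char pairs by slicing, then joins the pairs with a separator (a space, plus a newline every 16 pairs) emitted before every pair but the first, instead of A's per-character loop that tracks an index and appends separators after odd positions.
import Mathlib
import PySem

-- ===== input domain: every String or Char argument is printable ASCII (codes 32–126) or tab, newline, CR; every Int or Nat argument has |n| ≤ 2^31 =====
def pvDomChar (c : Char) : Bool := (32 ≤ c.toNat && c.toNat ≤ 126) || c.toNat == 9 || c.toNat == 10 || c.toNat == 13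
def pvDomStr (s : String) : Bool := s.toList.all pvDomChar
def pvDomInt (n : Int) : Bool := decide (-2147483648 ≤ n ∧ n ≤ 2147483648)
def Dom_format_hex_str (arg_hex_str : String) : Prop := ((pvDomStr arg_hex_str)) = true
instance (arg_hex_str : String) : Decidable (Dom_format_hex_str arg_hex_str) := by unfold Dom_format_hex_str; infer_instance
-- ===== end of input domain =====

-- B builds the output from 2-char chunks joined by separators instead of A's per-character
-- loop with index bookkeeping (objective: simpler decomposition, same linear cost).


-- ===== PORT A =====
-- literal port of A: one fold over the characters carrying (formatted_str, i)
def format_hex_str (arg_hex_str : String) : String :=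
  let chars := arg_hex_str.toList
  let res := chars.foldl (fun (st : List Char × Nat) hex_char =>
      let formatted := st.1 ++ [hex_char]
      let i := st.2
      let formatted :=
        if i % 2 == 1 && i != chars.length - 1 then
          let formatted := formatted ++ [' ']
          if (i + 1) % (16 * 2) == 0 then formatted ++ ['\n'] else formatted
        else formatted
      (formatted, i + 1)) ([], 0)
  String.ofList res.1

-- ===== PORT B =====
-- literal port of B: pair slices via range(0, len, 2), then a fold over enumerate(pairs)
-- appending a separator before every pair but the first; "".join(parts) = flatten (exact)
def format_hex_str_alt (arg_hex_str : String) : String :=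
  let chars := arg_hex_str.toList
  let pairs := (PySem.List.pyRange 0 chars.length 2).map
      (fun i => PySem.List.slice chars (some i) (some (i + 2)))
  let parts := (PySem.List.enumerate pairs 0).foldl
      (fun (parts : List (List Char)) jp =>
        let parts :=
          if jp.1 > 0 then
            parts ++ [if PySem.Int.mod jp.1 16 == 0 then [' ', '\n'] else [' ']]
          else parts
        parts ++ [jp.2]) []
  String.ofList parts.flatten

-- ===== PRECONDITION & SPEC =====
def Spec_format_hex_str (arg_hex_str : String) (out : String) : Prop := out = format_hex_str_alt arg_hex_str
instance (arg_hex_str : String) (out : String) : Decidable (Spec_format_hex_str arg_hex_str out) := by unfold Spec_format_hex_str; infer_instance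

-- ===== CLAIM (what is proved, stated in full; the proofs are below) =====
def Claim_equal_format_hex_str : Prop := ∀ (arg_hex_str : String), Dom_format_hex_str arg_hex_str → Spec_format_hex_str arg_hex_str (format_hex_str arg_hex_str)

-- ===== LEMMAS AND PROOFS =====

-- A's output, written as a structural recursion over the remaining characters
def outA (n : Nat) : Nat → List Char → List Char
  | _, [] => []
  | i, c :: t =>
      (c :: (if i % 2 == 1 && i != n - 1 then
               ' ' :: (if (i + 1) % (16 * 2) == 0 then ['\n'] else []) else []))
        ++ outA n (i + 1) t

-- B's output for a given pair list, starting at pair index j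
def outB : Nat → List (List Char) → List Char
  | _, [] => []
  | j, p :: ps =>
      (if 0 < j then (if j % 16 == 0 then [' ', '\n'] else [' ']) else []) ++ p ++ outB (j + 1) ps

-- B's pair list, as a structural recursion
def chunk2 : List Char → List (List Char)
  | [] => []
  | [a] => [[a]]
  | a :: b :: t => [a, b] :: chunk2 t

-- separator-AFTER-each-pair-but-the-last normal form both outputs reduce to
def joinA : Nat → List (List Char) → List Char
  | _, [] => []
  | _, [p] => p
  | j, p :: q :: ps => p ++ (if (j + 1) % 16 == 0 then [' ', '\n'] else [' ']) ++ joinA (j + 1) (q :: ps)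

lemma foldA (n : Nat) : ∀ (t : List Char) (acc : List Char) (i : Nat),
    t.foldl (fun (st : List Char × Nat) hex_char =>
      let formatted := st.1 ++ [hex_char]
      let i := st.2
      let formatted :=
        if i % 2 == 1 && i != n - 1 then
          let formatted := formatted ++ [' ']
          if (i + 1) % (16 * 2) == 0 then formatted ++ ['\n'] else formatted
        else formatted
      (formatted, i + 1)) (acc, i) = (acc ++ outA n i t, i + t.length) := by
  intro t
  induction t with
  | nil => intro acc i; simp [outA]
  | cons c t ih =>
      intro acc i
      simp only [List.foldl_cons, ih, outA, List.length_cons]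
      simp only [Prod.mk.injEq]
      refine ⟨?_, by omega⟩
      split_ifs <;> simp

lemma foldB : ∀ (ps : List (List Char)) (j : Nat) (acc : List (List Char)),
    ((PySem.List.enumerate ps (j : Int)).foldl
      (fun (parts : List (List Char)) jp =>
        let parts :=
          if jp.1 > 0 then
            parts ++ [if PySem.Int.mod jp.1 16 == 0 then [' ', '\n'] else [' ']]
          else parts
        parts ++ [jp.2]) acc).flatten = acc.flatten ++ outB j ps := by
  intro ps
  induction ps with
  | nil => intro j acc; simp [PySem.List.enumerate_nil, outB]
  | cons p ps ih =>
      intro j acc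
      rw [PySem.List.enumerate_cons]
      simp only [List.foldl_cons]
      have hcast : ((j : Int) + 1) = ((j + 1 : Nat) : Int) := by push_cast; ring
      rw [hcast, ih]
      simp only [outB, gt_iff_lt]
      have hpos : ((0 : Int) < (j : Int)) ↔ 0 < j := by exact_mod_cast Iff.rfl
      have hmod : (PySem.Int.mod (j : Int) 16 == 0) = (j % 16 == 0) := by
        rw [show ((16:Int)) = ((16:Nat):Int) by norm_num, PySem.Int.mod_natCast]
        simp
        omega
      split_ifs with h1 h2 h2' <;> simp_all

lemma foldB0 (ps : List (List Char)) (acc : List (List Char)) :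
    ((PySem.List.enumerate ps (0 : Int)).foldl
      (fun (parts : List (List Char)) jp =>
        let parts :=
          if jp.1 > 0 then
            parts ++ [if PySem.Int.mod jp.1 16 == 0 then [' ', '\n'] else [' ']]
          else parts
        parts ++ [jp.2]) acc).flatten = acc.flatten ++ outB 0 ps := by
  have h := foldB ps 0 acc
  simpa using h

lemma chunk2_eq_range : ∀ (l : List Char),
    (List.range ((l.length + 1) / 2)).map (fun k => (l.drop (2 * k)).take 2) = chunk2 l := by
  intro l
  induction l using chunk2.induct with
  | case1 => simp [chunk2]
  | case2 a => simp [chunk2, List.range_succ]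
  | case3 a b t ih =>
      have hlen : ((a :: b :: t).length + 1) / 2 = (t.length + 1) / 2 + 1 := by
        simp [List.length_cons]; omega
      rw [chunk2, hlen, List.range_succ_eq_map, List.map_cons, List.map_map]
      simp only [Nat.mul_zero, List.drop_zero]
      congr 1

lemma pairs_eq_chunk2 (l : List Char) :
    (PySem.List.pyRange 0 l.length 2).map
      (fun i => PySem.List.slice l (some i) (some (i + 2))) = chunk2 l := by
  rw [PySem.List.pyRange_of_pos 0 l.length (by norm_num), List.map_map]
  have hN : (if (0:Int) < l.length then (((l.length:Int) - 0 + 2 - 1) / 2).toNat else 0)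
      = (l.length + 1) / 2 := by
    split_ifs with h <;> omega
  rw [hN, ← chunk2_eq_range]
  apply List.map_congr_left
  intro k _
  simp only [Function.comp_apply, zero_add]
  rw [show (2 : Int) * (k : Nat) = ((2 * k : Nat) : Int) by push_cast; ring,
    show ((2 * k : Nat) : Int) + 2 = ((2 * k + 2 : Nat) : Int) by push_cast; ring,
    PySem.List.slice_natCast]
  congr 1
  omega

lemma chunk2_ne_nil {t : List Char} (h : t ≠ []) : chunk2 t ≠ [] := by
  match t with
  | [a] => simp [chunk2]
  | a :: b :: t => simp [chunk2]

lemma outB_eq_joinA : ∀ (ps : List (List Char)) (j : Nat),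
    outB j ps =
      (if 0 < j ∧ ps ≠ [] then (if j % 16 == 0 then [' ', '\n'] else [' ']) else []) ++ joinA j ps := by
  intro ps
  induction ps with
  | nil => intro j; simp [outB, joinA]
  | cons p ps ih =>
      intro j
      match ps with
      | [] => simp [outB, joinA]
      | q :: ps' =>
          rw [outB, ih (j + 1), joinA]
          split_ifs <;> simp_all

lemma outA_eq_joinA : ∀ (t : List Char) (j : Nat),
    outA (2 * j + t.length) (2 * j) t = joinA j (chunk2 t) := by
  intro t
  induction t using chunk2.induct with
  | case1 => intro j; simp [outA, chunk2, joinA]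
  | case2 a =>
      intro j
      rw [chunk2, outA, outA, joinA]
      have c1 : ((2 * j) % 2 == 1 && (2 * j) != 2 * j + [a].length - 1) = false := by
        simp
      rw [c1]
      simp
  | case3 a b t ih =>
      intro j
      rw [chunk2, outA, outA]
      have c1 : ((2 * j) % 2 == 1 && (2 * j) != 2 * j + (a :: b :: t).length - 1) = false := by
        simp
      rw [c1]
      match t, ih with
      | [], _ =>
          have c2 : ((2 * j + 1) % 2 == 1 && (2 * j + 1) != 2 * j + (a :: b :: ([] : List Char)).length - 1) = false := by
            simp
          rw [c2]
          simp [outA, chunk2, joinA]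
      | x :: t', ih =>
          have c2 : ((2 * j + 1) % 2 == 1 && (2 * j + 1) != 2 * j + (a :: b :: x :: t').length - 1) = true := by
            simp
          rw [c2]
          obtain ⟨q, ps, hq⟩ : ∃ q ps, chunk2 (x :: t') = q :: ps := by
            cases h : chunk2 (x :: t') with
            | nil => exact absurd h (chunk2_ne_nil (by simp))
            | cons q ps => exact ⟨q, ps, rfl⟩
          rw [hq, joinA, ← hq]
          have hn : 2 * j + (a :: b :: x :: t').length = 2 * (j + 1) + (x :: t').length := by
            simp; omega
          rw [hn, show 2 * j + 1 + 1 = 2 * (j + 1) by omega, ih (j + 1)]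
          have hsep : (' ' :: (if (2 * j + 1 + 1) % (16 * 2) == 0 then ['\n'] else []))
              = (if (j + 1) % 16 == 0 then [' ', '\n'] else [' ']) := by
            have : ((2 * j + 1 + 1) % (16 * 2) == 0) = ((j + 1) % 16 == 0) := by
              simp; omega
            rw [this]
            split_ifs <;> rfl
          rw [← hsep]
          simp only [List.cons_append, List.nil_append]
          have h32 : 2 * (j + 1) % 32 = (2 * j + 1 + 1) % 32 := by omega
          simp [h32]

-- ===== VERDICT (by name: the statement is the Claim_ definition above) =====
theorem format_hex_str_spec : Claim_equal_format_hex_str := by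
  intro s _
  unfold Spec_format_hex_str format_hex_str format_hex_str_alt
  simp only [foldA s.toList.length s.toList [] 0, pairs_eq_chunk2]
  simp only [List.nil_append]
  rw [foldB0]
  have h := outA_eq_joinA s.toList 0
  rw [Nat.mul_zero, Nat.zero_add] at h
  have h2 := outB_eq_joinA (chunk2 s.toList) 0
  rw [if_neg (by simp)] at h2
  rw [List.nil_append] at h2
  simp only [List.flatten_nil, List.nil_append]
  rw [h, h2]
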